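-- pv_equiv track=rewrite | github.com/notjayasuryakarthikeyan/python-tdd-classroom | src/string_exercise.py | get_word_lengths
-- ===== SOURCE A (Python) =====
-- def get_word_lengths(text):
--     """
--     Returns a list of integers representing
--     the word lengths in string text.
--     """
--     word = ""
--     word_length_list = []
--     for index_of_each_char in range(len(text)):
--         char_of_text = text[index_of_each_char]
--         if char_of_text != ' ':
--             word = word + char_of_text
--
--         if char_of_text == ' ' or index_of_each_char == len(text) - 1:
--             word_length_list.append(len(word))
--             word = ""
--
--     return word_length_list
-- ===== SOURCE B (Python) =====
-- def get_word_lengths(text):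
--     """
--     Returns a list of integers representing
--     the word lengths in string text.
--     """
--     n = len(text)
--     out = []
--     prev = -1  # index of the last space seen (-1 = virtual space before the text)
--     for i, c in enumerate(text):
--         if c == ' ':
--             out.append(i - prev - 1)
--             prev = i
--     if prev < n - 1:
--         out.append(n - 1 - prev)
--     return out
-- ===== Notes on version B (the rewrite author's own statement) =====
-- stated objective: faster
-- what changed: B computes word lengths as index gaps between consecutive space positions (with a -1 sentinel) plus a guarded trailing gap, instead of A's character-by-character word-string accumulation.
import Mathlib
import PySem

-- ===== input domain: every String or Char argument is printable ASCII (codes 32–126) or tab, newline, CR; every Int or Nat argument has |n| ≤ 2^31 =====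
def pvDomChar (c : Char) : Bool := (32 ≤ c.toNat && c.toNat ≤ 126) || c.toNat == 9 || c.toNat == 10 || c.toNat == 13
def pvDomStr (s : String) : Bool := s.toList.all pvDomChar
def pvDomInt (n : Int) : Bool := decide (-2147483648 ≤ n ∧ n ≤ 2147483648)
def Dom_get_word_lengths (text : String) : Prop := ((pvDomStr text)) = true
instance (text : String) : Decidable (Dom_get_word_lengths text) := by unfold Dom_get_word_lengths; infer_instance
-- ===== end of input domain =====

-- B replaces A's character-by-character word accumulation by space-index gap arithmetic
-- (a -1 sentinel and a guarded trailing gap); objective: alternative algorithm, no word string is built.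

-- ===== PORT A =====
-- for index_of_each_char in range(len(text)): char = text[index_of_each_char] — the index/char
-- pairs are iterated via PySem.List.enumerate (text[i] at index i is exactly the i-th char).
def get_word_lengths (text : String) : List Int :=
  let n : Int := PySem.Str.len text
  ((PySem.List.enumerate text.toList 0).foldl
    (fun (st : List Char × List Int) (p : Int × Char) =>
      let word := if p.2 ≠ ' ' then st.1 ++ [p.2] else st.1
      if p.2 = ' ' ∨ p.1 = n - 1 then ([], st.2 ++ [(word.length : Int)])
      else (word, st.2))
    ([], [])).2

-- ===== PORT B =====
def get_word_lengths_alt (text : String) : List Int :=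
  let n : Int := PySem.Str.len text
  let st := (PySem.List.enumerate text.toList 0).foldl
    (fun (st : Int × List Int) (p : Int × Char) =>
      if p.2 = ' ' then (p.1, st.2 ++ [p.1 - st.1 - 1]) else st)
    (-1, [])
  if st.1 < n - 1 then st.2 ++ [n - 1 - st.1] else st.2

-- ===== PRECONDITION & SPEC =====
def Spec_get_word_lengths (text : String) (out : List Int) : Prop := out = get_word_lengths_alt text
instance (text : String) (out : List Int) : Decidable (Spec_get_word_lengths text out) := by unfold Spec_get_word_lengths; infer_instance

-- ===== CLAIM (what is proved, stated in full; the proofs are below) =====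
def Claim_equal_get_word_lengths : Prop := ∀ (text : String), Dom_get_word_lengths text → Spec_get_word_lengths text (get_word_lengths text)

-- ===== LEMMAS AND PROOFS =====

-- proof-only helpers: the two loop bodies and B's trailing step, named so the inductions rewrite stably
def pvStepA (n : Int) (st : List Char × List Int) (p : Int × Char) : List Char × List Int :=
  let word := if p.2 ≠ ' ' then st.1 ++ [p.2] else st.1
  if p.2 = ' ' ∨ p.1 = n - 1 then ([], st.2 ++ [(word.length : Int)])
  else (word, st.2)

def pvStepB (st : Int × List Int) (p : Int × Char) : Int × List Int :=
  if p.2 = ' ' then (p.1, st.2 ++ [p.1 - st.1 - 1]) else st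

def pvFinB (n : Int) (st : Int × List Int) : List Int :=
  if st.1 < n - 1 then st.2 ++ [n - 1 - st.1] else st.2

-- A's emission pattern: emit the current word length at each space; at the last char (if not a space) emit the final word.
def pvModelA : List Char → Nat → List Int
  | [], _ => []
  | c :: rest, w =>
    if c = ' ' then (w : Int) :: pvModelA rest 0
    else if rest = [] then [(w : Int) + 1]
    else pvModelA rest (w + 1)

-- B's emission pattern: emit the current word length at each space; at the end emit the final word iff nonempty.
def pvModelB : List Char → Nat → List Int
  | [], w => if 0 < w then [(w : Int)] else []
  | c :: rest, w => if c = ' ' then (w : Int) :: pvModelB rest 0 else pvModelB rest (w + 1)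

theorem pv_lemA (N : Nat) (cs : List Char) : ∀ (k : Int) (word : List Char) (out : List Int),
    k + cs.length = N →
    ((PySem.List.enumerate cs k).foldl (pvStepA N) (word, out)).2 = out ++ pvModelA cs word.length := by
  induction cs with
  | nil => intro k word out h; simp [PySem.List.enumerate_nil, pvModelA]
  | cons c rest ih =>
    intro k word out h
    rw [PySem.List.enumerate_cons, List.foldl_cons]
    simp only [List.length_cons] at h
    by_cases hc : c = ' '
    · have hstep : pvStepA (N : Int) (word, out) (k, c) = ([], out ++ [(word.length : Int)]) := by
        simp [pvStepA, hc]
      rw [hstep, ih (k + 1) [] _ (by push_cast at h ⊢; omega)]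
      simp [pvModelA, hc, List.append_assoc]
    · by_cases hl : rest = []
      · have hk : k = (N : Int) - 1 := by subst hl; push_cast at h ⊢; simp at h; omega
        have hstep : pvStepA (N : Int) (word, out) (k, c)
            = ([], out ++ [((word ++ [c]).length : Int)]) := by
          simp [pvStepA, hc, hk]
        rw [hstep]
        subst hl
        simp [PySem.List.enumerate_nil, pvModelA, hc]
      · have hk : ¬ (k = (N : Int) - 1) := by
          have h1 : 1 ≤ rest.length := List.length_pos_iff.mpr hl
          push_cast at h ⊢; omega
        have hstep : pvStepA (N : Int) (word, out) (k, c) = (word ++ [c], out) := by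
          simp [pvStepA, hc, hk]
        rw [hstep, ih (k + 1) (word ++ [c]) out (by push_cast at h ⊢; omega)]
        simp [pvModelA, hc, hl]

theorem pv_lemB (N : Nat) (cs : List Char) : ∀ (k : Int) (w : Nat) (out : List Int),
    k + cs.length = N →
    pvFinB N ((PySem.List.enumerate cs k).foldl pvStepB (k - 1 - w, out)) = out ++ pvModelB cs w := by
  induction cs with
  | nil =>
    intro k w out h
    simp only [PySem.List.enumerate_nil, List.foldl_nil, List.length_nil, Nat.cast_zero,
      add_zero] at *
    by_cases hw : 0 < w
    · have hcond : k - 1 - (w : Int) < (N : Int) - 1 := by omega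
      have hval : (N : Int) - 1 - (k - 1 - w) = (w : Int) := by omega
      simp [pvFinB, pvModelB, hcond, hval, hw]
    · have hw0 : w = 0 := by omega
      subst hw0
      simp only [pvFinB, pvModelB, Nat.cast_zero]
      rw [if_neg (by omega), if_neg (by omega)]
      simp
  | cons c rest ih =>
    intro k w out h
    rw [PySem.List.enumerate_cons, List.foldl_cons]
    simp only [List.length_cons] at h
    by_cases hc : c = ' '
    · have hstep : pvStepB (k - 1 - w, out) (k, c) = (k, out ++ [(w : Int)]) := by
        simp [pvStepB, hc]; omega
      have hrec := ih (k + 1) 0 (out ++ [(w : Int)]) (by push_cast at h ⊢; omega)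
      rw [show k + 1 - 1 - ((0 : Nat) : Int) = k by simp] at hrec
      rw [hstep, hrec]
      simp [pvModelB, hc, List.append_assoc]
    · have hstep : pvStepB (k - 1 - w, out) (k, c) = (k - 1 - w, out) := by
        simp [pvStepB, hc]
      have hrec := ih (k + 1) (w + 1) out (by push_cast at h ⊢; omega)
      rw [show k + 1 - 1 - (((w + 1 : Nat)) : Int) = k - 1 - (w : Int) by push_cast; omega] at hrec
      rw [hstep, hrec]
      simp [pvModelB, hc]

theorem pv_bridge (cs : List Char) : ∀ (w : Nat), (cs = [] → w = 0) → pvModelA cs w = pvModelB cs w := by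
  induction cs with
  | nil => intro w h; simp [pvModelA, pvModelB, h rfl]
  | cons c rest ih =>
    intro w _
    by_cases hc : c = ' '
    · simp only [pvModelA, pvModelB, if_pos hc]
      rw [ih 0 (fun _ => rfl)]
    · by_cases hl : rest = []
      · subst hl
        simp [pvModelA, pvModelB, hc]
      · simp only [pvModelA, pvModelB, if_neg hc, if_neg hl]
        exact ih (w + 1) (fun h => absurd h hl)

-- ===== VERDICT (by name: the statement is the Claim_ definition above) =====
theorem get_word_lengths_spec : Claim_equal_get_word_lengths := by
  intro text _
  show get_word_lengths text = get_word_lengths_alt text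
  have hA : get_word_lengths text = pvModelA text.toList 0 := by
    unfold get_word_lengths
    simp only [PySem.Str.len_eq]
    exact pv_lemA text.toList.length text.toList 0 [] [] (by simp)
  have hB : get_word_lengths_alt text = pvModelB text.toList 0 := by
    unfold get_word_lengths_alt
    simp only [PySem.Str.len_eq]
    exact pv_lemB text.toList.length text.toList 0 0 [] (by simp)
  rw [hA, hB]
  exact pv_bridge text.toList 0 (fun _ => rfl)
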